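-- pv_equiv track=rewrite | github.com/LuHaofan/Joker | editor/KeywordExtractor.py | wordfreqAnalysis
-- ===== SOURCE A (Python) =====
-- def wordfreqAnalysis(tokens):
--     d = {}
--     for word in tokens:
--         if word in d.keys():
--             d[word] += 1
--         else:
--             d[word] = 1
--     res = list(d.keys())
--     res.sort(key = len, reverse=True)
--     return res
-- ===== SOURCE B (Python) =====
-- def wordfreqAnalysis(tokens):
--     seen = set()
--     buckets = {}
--     for word in tokens:
--         if word not in seen:
--             seen.add(word)
--             buckets.setdefault(len(word), []).append(word)
--     res = []
--     for length in sorted(buckets, reverse=True):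
--         res.extend(buckets[length])
--     return res
-- ===== Notes on version B (the rewrite author's own statement) =====
-- stated objective: alternative
-- what changed: Drops the frequency counting entirely (the counts never affect the output) and replaces the stable sort by length with length buckets filled in first-occurrence order and emitted in descending length order.
import Mathlib
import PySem

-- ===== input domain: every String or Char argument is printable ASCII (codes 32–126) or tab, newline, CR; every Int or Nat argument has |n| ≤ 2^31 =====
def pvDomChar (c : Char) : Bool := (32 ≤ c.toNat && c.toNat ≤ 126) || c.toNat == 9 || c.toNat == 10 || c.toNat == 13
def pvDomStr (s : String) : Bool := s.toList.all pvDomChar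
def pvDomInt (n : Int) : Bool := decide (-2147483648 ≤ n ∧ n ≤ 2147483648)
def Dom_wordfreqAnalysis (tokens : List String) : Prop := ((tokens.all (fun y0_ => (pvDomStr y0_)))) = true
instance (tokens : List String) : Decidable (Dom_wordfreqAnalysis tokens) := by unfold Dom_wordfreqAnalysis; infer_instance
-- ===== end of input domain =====

-- B drops the frequency counting (the counts never affect the output) and replaces the
-- stable length-descending sort by length buckets filled in first-occurrence order and
-- concatenated from longest to shortest length; objective: alternative algorithm.

-- ===== PORT A =====

def wordfreqAnalysis (tokens : List String) : List String :=
  let d := tokens.foldl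
    (fun (d : PySem.Dict String Int) word =>
      if d.contains word then d.insert word (d.getD word 0 + 1)
      else d.insert word 1)
    PySem.Dict.empty
  let res := d.keys
  PySem.List.sorted res (fun w => PySem.Str.len w) true

-- ===== PORT B =====

def wfaStep (st : PySem.Set String × PySem.Dict Int (List String)) (word : String) :
    PySem.Set String × PySem.Dict Int (List String) :=
  if st.1.contains word then st
  else (PySem.Set.add st.1 word,
        st.2.insert (PySem.Str.len word) (st.2.getD (PySem.Str.len word) [] ++ [word]))

def wordfreqAnalysis_alt (tokens : List String) : List String :=
  let st := tokens.foldl wfaStep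
    ((PySem.Set.empty : PySem.Set String), (PySem.Dict.empty : PySem.Dict Int (List String)))
  (PySem.List.sorted st.2.keys (fun x => x) true).foldl
    (fun res l => res ++ st.2.getD l []) []

-- ===== PRECONDITION & SPEC =====

def Spec_wordfreqAnalysis (tokens : List String) (out : List String) : Prop := out = wordfreqAnalysis_alt tokens

instance (tokens : List String) (out : List String) : Decidable (Spec_wordfreqAnalysis tokens out) := by unfold Spec_wordfreqAnalysis; infer_instance

-- ===== CLAIM (what is proved, stated in full; the proofs are below) =====

def Claim_equal_wordfreqAnalysis : Prop := ∀ (tokens : List String), Dom_wordfreqAnalysis tokens → Spec_wordfreqAnalysis tokens (wordfreqAnalysis tokens)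

-- ===== LEMMAS AND PROOFS =====

theorem getq_mk_map (L : List Int) (f : Int → List String) (x : Int) :
    (PySem.Dict.mk (L.map fun ℓ => (ℓ, f ℓ))).get? x = if x ∈ L then some (f x) else none := by
  induction L with
  | nil => simp [PySem.Dict.get?]
  | cons a L ih =>
    simp only [List.map_cons, PySem.Dict.get?_mk_cons, ih, List.mem_cons]
    by_cases hax : a = x
    · subst hax; simp
    · simp [hax, Ne.symm hax]

def bFold (ys : List String) : PySem.Dict Int (List String) :=
  ys.foldl (fun d w => d.insert (PySem.Str.len w) (d.getD (PySem.Str.len w) [] ++ [w]))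
    PySem.Dict.empty

theorem bFold_items (ys : List String) :
    (bFold ys).items =
      (PySem.Set.ofList (ys.map PySem.Str.len)).map
        (fun ℓ => (ℓ, ys.filter (fun w => PySem.Str.len w == ℓ))) := by
  induction ys using List.reverseRecOn with
  | nil => simp [bFold, PySem.Dict.empty, PySem.Set.ofList]
  | append_singleton ys w ih =>
    have hbf : bFold (ys ++ [w]) =
        (bFold ys).insert (PySem.Str.len w) ((bFold ys).getD (PySem.Str.len w) [] ++ [w]) := by
      simp [bFold]
    set L := PySem.Set.ofList (ys.map PySem.Str.len) with hL
    set f : Int → List String := fun ℓ => ys.filter (fun w => PySem.Str.len w == ℓ) with hf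
    have hbfy : bFold ys = PySem.Dict.mk (L.map fun ℓ => (ℓ, f ℓ)) := by
      cases h : bFold ys with
      | mk items => cases h ▸ ih; rfl
    have hget : (bFold ys).get? (PySem.Str.len w) =
        if PySem.Str.len w ∈ L then some (f (PySem.Str.len w)) else none := by
      rw [hbfy, getq_mk_map]
    have hLnew : PySem.Set.ofList ((ys ++ [w]).map PySem.Str.len) =
        if PySem.Str.len w ∈ L then L else L ++ [PySem.Str.len w] := by
      rw [List.map_append, List.map_singleton, PySem.Set.ofList_eq_foldl, List.foldl_append]
      rw [← PySem.Set.ofList_eq_foldl, ← hL]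
      simp [PySem.Set.add]
    have hfnew : ∀ ℓ, (ys ++ [w]).filter (fun w' => PySem.Str.len w' == ℓ)
        = f ℓ ++ (if PySem.Str.len w = ℓ then [w] else []) := by
      intro ℓ
      rw [List.filter_append, hf]
      congr 1
      by_cases h : PySem.Str.len w = ℓ
      · rw [if_pos h]; simp [List.filter_cons]; exact h
      · rw [if_neg h]; simp [List.filter_cons]; exact h
    by_cases hmem : PySem.Str.len w ∈ L
    · -- length already a key: insert overwrites in place
      have hcont : (bFold ys).contains (PySem.Str.len w) = true := by
        rw [PySem.Dict.contains_eq_isSome_get?, hget, if_pos hmem]; rfl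
      have hgd : (bFold ys).getD (PySem.Str.len w) [] = f (PySem.Str.len w) := by
        rw [show (bFold ys).getD (PySem.Str.len w) [] =
            ((bFold ys).get? (PySem.Str.len w)).getD [] from rfl, hget, if_pos hmem]
        rfl
      rw [hbf, hLnew, if_pos hmem, hgd]
      rw [show ((bFold ys).insert (PySem.Str.len w) (f (PySem.Str.len w) ++ [w])).items
          = if (bFold ys).contains (PySem.Str.len w) = true
            then (bFold ys).items.map
              (fun p => if p.1 == PySem.Str.len w then (PySem.Str.len w, f (PySem.Str.len w) ++ [w]) else p)
            else (bFold ys).items ++ [(PySem.Str.len w, f (PySem.Str.len w) ++ [w])] from by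
        rw [PySem.Dict.insert]; split <;> simp]
      rw [if_pos hcont, hbfy]
      show (L.map fun ℓ => (ℓ, f ℓ)).map _ = _
      rw [List.map_map]
      apply List.map_congr_left
      intro ℓ hℓ
      show (if (ℓ == PySem.Str.len w) = true
          then (PySem.Str.len w, f (PySem.Str.len w) ++ [w]) else (ℓ, f ℓ))
        = (ℓ, List.filter (fun w' => PySem.Str.len w' == ℓ) (ys ++ [w]))
      by_cases h : ℓ = PySem.Str.len w
      · subst h
        rw [if_pos (by simp), hfnew, if_pos rfl]
      · have h2 : ¬ PySem.Str.len w = ℓ := fun hh => h hh.symm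
        rw [if_neg (by simp; exact fun hh => h hh), hfnew, if_neg h2, List.append_nil]
    · -- new length: insert appends
      have hcont : (bFold ys).contains (PySem.Str.len w) = false := by
        rw [PySem.Dict.contains_eq_isSome_get?, hget, if_neg hmem]; rfl
      have hgd : (bFold ys).getD (PySem.Str.len w) [] = [] := by
        rw [show (bFold ys).getD (PySem.Str.len w) [] =
            ((bFold ys).get? (PySem.Str.len w)).getD [] from rfl, hget, if_neg hmem]
        rfl
      have hfilter_nil : f (PySem.Str.len w) = [] := by
        rw [hf]
        apply List.filter_eq_nil_iff.mpr
        intro a ha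
        simp only [beq_iff_eq]
        intro heq
        exact hmem (by rw [hL, PySem.Set.mem_ofList, ← heq]; exact List.mem_map_of_mem ha)
      rw [hbf, hLnew, if_neg hmem, hgd]
      rw [show ((bFold ys).insert (PySem.Str.len w) ([] ++ [w])).items
          = (bFold ys).items ++ [(PySem.Str.len w, [] ++ [w])] from by
        rw [PySem.Dict.insert]
        rw [if_neg (by rw [show ((bFold ys).contains (PySem.Str.len w) = true) = ((bFold ys).contains (PySem.Str.len w) = true) from rfl, hcont]; simp)]]
      rw [ih, List.map_append, List.map_singleton]
      congr 1
      · apply List.map_congr_left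
        intro ℓ hℓ
        have hne : ¬ PySem.Str.len w = ℓ := fun hh => hmem (hh ▸ hℓ)
        show (ℓ, f ℓ) = (ℓ, List.filter (fun w' => PySem.Str.len w' == ℓ) (ys ++ [w]))
        rw [hfnew, if_neg hne, List.append_nil]
      · rw [hfnew, hfilter_nil, if_pos rfl, List.nil_append]

theorem insertBy_append_skip {α : Type} (before : α → α → Bool) (x : α) (B t : List α)
    (h : ∀ y ∈ B, before x y = false) :
    PySem.List.insertBy before x (B ++ t) = B ++ PySem.List.insertBy before x t := by
  induction B with
  | nil => simp
  | cons b B ih =>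
    simp only [List.cons_append, PySem.List.insertBy]
    rw [ih (fun y hy => h y (by simp [hy])), h b (by simp)]
    simp

def bucketsCat (L : List Int) (ys : List String) : List String :=
  L.flatMap (fun ℓ => ys.filter (fun w => PySem.Str.len w == ℓ))

theorem insertBy_bucketsCat (x : String) (L : List Int) (ys : List String)
    (hp : L.Pairwise (· > ·)) (hm : PySem.Str.len x ∈ L) :
    PySem.List.insertBy (fun a b => decide (PySem.Str.len b < PySem.Str.len a)) x (bucketsCat L ys)
      = bucketsCat L (ys ++ [x]) := by
  induction L with
  | nil => cases hm
  | cons ℓ L ih =>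
    rw [List.pairwise_cons] at hp
    obtain ⟨hlt, hp'⟩ := hp
    have hBkey : ∀ y ∈ ys.filter (fun w => PySem.Str.len w == ℓ), PySem.Str.len y = ℓ := by
      intro y hy
      have := List.of_mem_filter hy
      simpa using this
    have hRestKey : ∀ z ∈ bucketsCat L ys, PySem.Str.len z ∈ L := by
      intro z hz
      rw [bucketsCat, List.mem_flatMap] at hz
      obtain ⟨ℓ', hℓ', hzf⟩ := hz
      have heq : PySem.Str.len z = ℓ' := by simpa using List.of_mem_filter hzf
      rw [heq]; exact hℓ'
    show PySem.List.insertBy _ x ((ys.filter (fun w => PySem.Str.len w == ℓ)) ++ bucketsCat L ys) = _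
    by_cases hx : PySem.Str.len x = ℓ
    · -- x belongs to the first bucket: it goes right after it
      rw [insertBy_append_skip _ _ _ _ (by
        intro y hy
        simp only [decide_eq_false_iff_not, not_lt]
        rw [hBkey y hy, hx])]
      have hhead : PySem.List.insertBy (fun a b => decide (PySem.Str.len b < PySem.Str.len a)) x
          (bucketsCat L ys) = x :: bucketsCat L ys := by
        cases hBL : bucketsCat L ys with
        | nil => rfl
        | cons z zs =>
          have hz : PySem.Str.len z ∈ L := hRestKey z (by rw [hBL]; simp)
          have hzx : PySem.Str.len z < PySem.Str.len x := hx ▸ hlt _ hz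
          simp only [PySem.List.insertBy]
          rw [if_pos (decide_eq_true hzx)]
      rw [hhead]
      show _ = (ys ++ [x]).filter (fun w => PySem.Str.len w == ℓ) ++ bucketsCat L (ys ++ [x])
      have h1 : List.filter (fun w => PySem.Str.len w == ℓ) [x] = [x] := by
        rw [List.filter_cons, beq_iff_eq.mpr hx]; rfl
      have h2 : bucketsCat L (ys ++ [x]) = bucketsCat L ys := by
        simp only [bucketsCat, List.flatMap_def]
        congr 1
        apply List.map_congr_left
        intro ℓ' hℓ'
        have hne : (PySem.Str.len x == ℓ') = false := by
          apply beq_eq_false_iff_ne.mpr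
          rw [hx]
          exact ne_of_gt (hlt _ hℓ')
        rw [List.filter_append,
          show List.filter (fun w => PySem.Str.len w == ℓ') [x] = [] from by
            rw [List.filter_cons, hne]; rfl,
          List.append_nil]
      rw [List.filter_append, h1, h2]
      simp
    · -- x belongs to a later bucket
      have hxL : PySem.Str.len x ∈ L := by
        rcases List.mem_cons.mp hm with h | h
        · exact absurd h hx
        · exact h
      rw [insertBy_append_skip _ _ _ _ (by
        intro y hy
        have h1 : PySem.Str.len x < ℓ := hlt _ hxL
        simp only [decide_eq_false_iff_not, not_lt]
        rw [hBkey y hy]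
        exact le_of_lt h1)]
      rw [ih hp' hxL]
      show _ = (ys ++ [x]).filter (fun w => PySem.Str.len w == ℓ) ++ bucketsCat L (ys ++ [x])
      rw [List.filter_append]
      have h1 : List.filter (fun w => PySem.Str.len w == ℓ) [x] = [] := by
        rw [List.filter_cons, beq_eq_false_iff_ne.mpr hx]; rfl
      rw [h1, List.append_nil]

theorem sorted_eq_bucketsCat (ys : List String) (L : List Int)
    (hp : L.Pairwise (· > ·)) (hm : ∀ w ∈ ys, PySem.Str.len w ∈ L) :
    PySem.List.sorted ys (fun w => PySem.Str.len w) true = bucketsCat L ys := by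
  induction ys using List.reverseRecOn with
  | nil =>
    rw [show PySem.List.sorted [] (fun w => PySem.Str.len w) true = [] from rfl]
    simp [bucketsCat]
  | append_singleton ys x ih =>
    rw [PySem.List.sorted_rev_eq_foldl_insertBy, List.foldl_append, List.foldl_cons, List.foldl_nil,
      ← PySem.List.sorted_rev_eq_foldl_insertBy,
      ih (fun w hw => hm w (by simp [hw]))]
    exact insertBy_bucketsCat x L ys hp (hm x (by simp))

theorem a_keys (tokens : List String) :
    wordfreqAnalysis tokens =
      PySem.List.sorted (PySem.Set.ofList tokens) (fun w => PySem.Str.len w) true := by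
  show PySem.List.sorted
      (List.foldl (fun (d : PySem.Dict String Int) word =>
        if d.contains word then d.insert word (d.getD word 0 + 1)
        else d.insert word 1) PySem.Dict.empty tokens).keys
      (fun w => PySem.Str.len w) true = _
  have h : (fun (d : PySem.Dict String Int) word =>
      if d.contains word then d.insert word (d.getD word 0 + 1)
      else d.insert word 1)
    = fun d word => d.insert word (if d.contains word then d.getD word 0 + 1 else 1) := by
    funext d w; split <;> rfl
  rw [h, PySem.Dict.keys_foldl_insert]
  simp [PySem.Dict.empty, PySem.Dict.keys, PySem.Set.update_nil_left]

theorem b_fold_pair (tokens : List String) (s : PySem.Set String)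
    (d : PySem.Dict Int (List String)) :
    ∃ new, PySem.Set.update s tokens = s ++ new ∧
      tokens.foldl wfaStep (s, d) =
        (s ++ new,
         new.foldl (fun d w => d.insert (PySem.Str.len w) (d.getD (PySem.Str.len w) [] ++ [w])) d) := by
  induction tokens generalizing s d with
  | nil => exact ⟨[], by simp [PySem.Set.update]⟩
  | cons w t ih =>
    by_cases hc : w ∈ s
    · obtain ⟨new, h1, h2⟩ := ih s d
      refine ⟨new, ?_, ?_⟩
      · simpa [PySem.Set.update, PySem.Set.add, hc] using h1
      · simpa [wfaStep, hc] using h2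
    · obtain ⟨new, h1, h2⟩ := ih (s ++ [w])
        (d.insert (PySem.Str.len w) (d.getD (PySem.Str.len w) [] ++ [w]))
      refine ⟨w :: new, ?_, ?_⟩
      · rw [show PySem.Set.update s (w :: t) = PySem.Set.update (PySem.Set.add s w) t from rfl]
        have : PySem.Set.add s w = s ++ [w] := by simp [PySem.Set.add, hc]
        rw [this]
        simpa using h1
      · rw [show (w :: t).foldl wfaStep (s, d) = t.foldl wfaStep (wfaStep (s, d) w) from rfl]
        have hst : wfaStep (s, d) w = (s ++ [w],
            d.insert (PySem.Str.len w) (d.getD (PySem.Str.len w) [] ++ [w])) := by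
          simp [wfaStep, PySem.Set.add, hc]
        rw [hst, h2]
        simp

theorem final_check (tokens : List String) :
    wordfreqAnalysis tokens = wordfreqAnalysis_alt tokens := by
  -- B side: reduce the fold with seen-skip to bFold over the deduped tokens
  obtain ⟨new, h1, h2⟩ := b_fold_pair tokens [] PySem.Dict.empty
  rw [PySem.Set.update_nil_left] at h1
  simp only [List.nil_append] at h1 h2
  have hded : new = PySem.Set.ofList tokens := h1.symm
  subst hded
  set ded := PySem.Set.ofList tokens with hded
  set L0 := PySem.Set.ofList (ded.map PySem.Str.len) with hL0
  set f : Int → List String := fun ℓ => ded.filter (fun w => PySem.Str.len w == ℓ) with hf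
  have hbfy : bFold ded = PySem.Dict.mk (L0.map fun ℓ => (ℓ, f ℓ)) := by
    cases h : bFold ded with
    | mk items => cases h ▸ bFold_items ded; rfl
  have hkeys : (bFold ded).keys = L0 := by
    rw [hbfy]
    show (L0.map fun ℓ => (ℓ, f ℓ)).map Prod.fst = L0
    rw [List.map_map]
    have : (Prod.fst ∘ fun ℓ => (ℓ, f ℓ)) = (id : Int → Int) := by funext a; rfl
    rw [this, List.map_id]
  have hB : wordfreqAnalysis_alt tokens =
      (PySem.List.sorted L0 (fun x => x) true).foldl
        (fun res l => res ++ (bFold ded).getD l []) [] := by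
    show (PySem.List.sorted (tokens.foldl wfaStep (PySem.Set.empty, PySem.Dict.empty)).2.keys
        (fun x => x) true).foldl
        (fun res l => res ++ (tokens.foldl wfaStep (PySem.Set.empty, PySem.Dict.empty)).2.getD l []) [] = _
    rw [show tokens.foldl wfaStep (PySem.Set.empty, PySem.Dict.empty)
        = (ded, bFold ded) from h2, hkeys]
  rw [hB]
  set Ls := PySem.List.sorted L0 (fun x => x) true with hLs
  -- the sorted distinct lengths are strictly decreasing
  have hnd : Ls.Nodup := by
    have hn0 : L0.Nodup := by rw [hL0]; exact PySem.Set.nodup_ofList _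
    exact (List.Perm.nodup_iff (PySem.List.sorted_perm L0 (fun x => x) true)).mpr hn0
  have hge : Ls.Pairwise (fun a b => b ≤ a) := PySem.List.sorted_pairwise_rev L0 (fun x => x)
  have hgt : Ls.Pairwise (· > ·) := by
    refine (hge.and hnd).imp ?_
    rintro a b ⟨hle, hne⟩
    exact lt_of_le_of_ne hle (Ne.symm hne)
  have hmem : ∀ w ∈ ded, PySem.Str.len w ∈ Ls := by
    intro w hw
    rw [hLs, PySem.List.mem_sorted, hL0, PySem.Set.mem_ofList]
    exact List.mem_map_of_mem hw
  -- A side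
  rw [a_keys, ← hded, sorted_eq_bucketsCat ded Ls hgt hmem]
  -- both sides are the concatenation of buckets over Ls
  rw [PySem.List.foldl_append_eq_flatMap, List.nil_append, bucketsCat]
  simp only [List.flatMap_def]
  congr 1
  apply List.map_congr_left
  intro ℓ hℓ
  have hℓ0 : ℓ ∈ L0 := by
    rw [hLs, PySem.List.mem_sorted] at hℓ
    exact hℓ
  rw [show (bFold ded).getD ℓ [] = ((bFold ded).get? ℓ).getD [] from rfl, hbfy, getq_mk_map,
    if_pos hℓ0]
  rfl

-- ===== VERDICT (by name: the statement is the Claim_ definition above) =====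

theorem wordfreqAnalysis_spec : Claim_equal_wordfreqAnalysis := by
  intro tokens _
  unfold Spec_wordfreqAnalysis
  exact final_check tokens
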